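-- pv_equiv track=rewrite | github.com/iron-bun/adventofcode | 2022/day06.py | solution
-- ===== SOURCE A (Python) =====
-- def solution(data, length):
--     ans = length
--
--     tmp = list(data[:length-1])
--     data = data[length-1:]
--     for char in data:
--         tmp.append(char)
--         if len(set(tmp)) == length:
--             return ans
--         tmp.pop(0)
--         ans += 1
--     return 0
-- ===== SOURCE B (Python) =====
-- def solution(data, length):
--     # O(n) sliding window: 'start' is the left edge of the longest all-distinct
--     # window ending at i, maintained from the last-seen index of each character.
--     last = {}
--     start = 0
--     for i, c in enumerate(data):
--         j = last.get(c)
--         if j is not None and j >= start: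
--             start = j + 1
--         last[c] = i
--         if i - start + 1 == length:
--             return i + 1
--     return 0
-- ===== Notes on version B (the rewrite author's own statement) =====
-- stated objective: faster
-- what changed: Replaced the per-position rebuild of a length-sized window with a set() distinctness test (O(n*length)) by a single-pass sliding window that keeps each character's last-seen index in a dict and maintains the left edge of the longest all-distinct window incrementally (O(n)).
import Mathlib
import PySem

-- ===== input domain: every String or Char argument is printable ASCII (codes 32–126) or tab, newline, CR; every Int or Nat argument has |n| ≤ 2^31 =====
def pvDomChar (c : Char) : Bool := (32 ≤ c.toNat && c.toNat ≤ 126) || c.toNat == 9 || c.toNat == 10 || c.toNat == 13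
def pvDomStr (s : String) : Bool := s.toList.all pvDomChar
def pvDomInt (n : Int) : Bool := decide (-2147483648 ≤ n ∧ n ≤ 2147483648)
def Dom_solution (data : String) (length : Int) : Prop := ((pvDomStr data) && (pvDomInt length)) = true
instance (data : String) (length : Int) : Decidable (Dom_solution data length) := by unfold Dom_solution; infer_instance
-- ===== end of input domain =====

-- B replaces A's per-position window rebuild + set() distinctness test by a
-- one-pass last-seen-index sliding window (objective: faster).

-- ===== PORT A =====
-- the for-loop of A: state (ans, tmp); tmp.pop(0) never raises here (tmp has
-- just had an element appended), so the mutation is ported as dropping the head.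
def solutionLoopA (length : Int) : List Char → Int → List Char → Int
  | [], _, _ => 0
  | c :: rest, ans, tmp =>
    let tmp' := tmp ++ [c]
    if ((PySem.Set.ofList tmp').length : Int) = length then ans
    else solutionLoopA length rest (ans + 1) (tmp'.drop 1)

def solution (data : String) (length : Int) : Int :=
  let tmp := PySem.List.slice data.toList none (some (length - 1))
  let data' := PySem.List.slice data.toList (some (length - 1)) none
  solutionLoopA length data' length tmp

-- ===== PORT B =====
-- the for-loop of B: i is the enumerate index, last the last-seen dict, start
-- the left edge of the current all-distinct window.
def solutionLoopB (length : Int) : List Char → Int → PySem.Dict Char Int → Int → Int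
  | [], _, _, _ => 0
  | c :: rest, i, last, start =>
    let start' := match last.get? c with
      | some j => if start ≤ j then j + 1 else start
      | none => start
    let last' := last.insert c i
    if i - start' + 1 = length then i + 1
    else solutionLoopB length rest (i + 1) last' start'

def solution_alt (data : String) (length : Int) : Int :=
  solutionLoopB length data.toList 0 PySem.Dict.empty 0

-- ===== PRECONDITION & SPEC =====
def Spec_solution (data : String) (length : Int) (out : Int) : Prop := out = solution_alt data length
instance (data : String) (length : Int) (out : Int) : Decidable (Spec_solution data length out) := by unfold Spec_solution; infer_instance

-- ===== CLAIM (what is proved, stated in full; the proofs are below) =====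
def Claim_equal_solution : Prop := ∀ (data : String) (length : Int), Dom_solution data length → Spec_solution data length (solution data length)

-- ===== LEMMAS AND PROOFS =====

-- common characterisation of both loops: k + len for the first k whose length-len
-- window at k is all-distinct, else 0
def winSpec (l : List Char) (len : Nat) : Int :=
  match (List.range' 0 (l.length + 1 - len)).find? (fun k => decide (((l.drop k).take len).Nodup)) with
  | some k => ((k : Int) + (len : Int))
  | none => 0

theorem nodup_append_singleton_iff (a : List Char) (c : Char) :
    (a ++ [c]).Nodup ↔ a.Nodup ∧ c ∉ a := by
  rw [List.nodup_append]
  constructor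
  · rintro ⟨h1, _, h3⟩
    exact ⟨h1, fun hm => h3 c hm c (List.mem_singleton_self c) rfl⟩
  · rintro ⟨h1, h2⟩
    refine ⟨h1, List.nodup_singleton c, ?_⟩
    intro x hx y hy
    rw [List.mem_singleton] at hy
    subst hy
    intro he
    subst he
    exact h2 hx

theorem length_ofList_eq_iff_nodup (xs : List Char) :
    (PySem.Set.ofList xs).length = xs.length ↔ xs.Nodup := by
  induction xs using List.reverseRecOn with
  | nil => simp [PySem.Set.ofList_nil]
  | append_singleton ys y ihy =>
    rw [PySem.Set.ofList_append_singleton, PySem.Set.add_eq_ite]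
    by_cases hy : y ∈ ys
    · rw [if_pos ((PySem.Set.mem_ofList _ _).mpr hy)]
      have hle := PySem.Set.length_ofList_le (xs := ys)
      simp only [List.length_append, List.length_singleton]
      constructor
      · intro h; omega
      · intro h
        rcases (nodup_append_singleton_iff ys y).mp h with ⟨_, hnm⟩
        exact absurd hy hnm
    · rw [if_neg (fun hmem => hy ((PySem.Set.mem_ofList _ _).mp hmem))]
      simp only [List.length_append, List.length_singleton]
      rw [nodup_append_singleton_iff]
      constructor
      · intro h
        exact ⟨ihy.mp (by omega), hy⟩
      · rintro ⟨hnd, _⟩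
        have := ihy.mpr hnd
        omega

theorem find?_range'_eq_some (M k : Nat) (p : Nat → Bool) (hk : k < M)
    (hlt : ∀ j, j < k → p j = false) (hp : p k = true) :
    (List.range' 0 M).find? p = some k := by
  suffices h : ∀ (n s : Nat), s ≤ k → k < s + n → (∀ j, s ≤ j → j < k → p j = false) →
      (List.range' s n).find? p = some k by
    exact h M 0 (by omega) (by omega) (fun j _ hj => hlt j hj)
  intro n
  induction n with
  | zero => intro s h1 h2 h3; omega
  | succ n ihn =>
    intro s h1 h2 h3
    rw [List.range'_succ]
    by_cases hsk : s = k
    · subst hsk; rw [List.find?_cons_of_pos hp]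
    · rw [List.find?_cons_of_neg (by simp [h3 s (le_refl s) (by omega)])]
      exact ihn (s + 1) (by omega) (by omega) (fun j hj1 hj2 => h3 j (by omega) hj2)

theorem loopA_zero (length : Int) (hle : length ≤ 0) :
    ∀ (rest : List Char) (ans : Int) (tmp : List Char),
      solutionLoopA length rest ans tmp = 0 := by
  intro rest
  induction rest with
  | nil => intro ans tmp; simp [solutionLoopA]
  | cons c rest' ih =>
    intro ans tmp
    simp only [solutionLoopA]
    rw [if_neg ?_]
    · exact ih (ans + 1) _
    · have hmem : c ∈ PySem.Set.ofList (tmp ++ [c]) := (PySem.Set.mem_ofList _ _).mpr (by simp)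
      have hpos := List.length_pos_of_mem hmem
      intro hcon
      omega

theorem loopB_zero (length : Int) (hle : length ≤ 0) :
    ∀ (rest : List Char) (i start : Int) (last : PySem.Dict Char Int),
      0 ≤ start → start ≤ i →
      (∀ ch j, last.get? ch = some j → 0 ≤ j ∧ j < i) →
      solutionLoopB length rest i last start = 0 := by
  intro rest
  induction rest with
  | nil => intro i start last _ _ _; simp [solutionLoopB]
  | cons c rest' ih =>
    intro i start last h0 hsi hV
    simp only [solutionLoopB]
    have hV' : ∀ ch j, ((last.insert c i).get? ch = some j) → 0 ≤ j ∧ j < i + 1 := by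
      intro ch j hj
      rw [PySem.Dict.get?_insert] at hj
      by_cases hch : ch = c
      · rw [if_pos hch] at hj
        have := Option.some.inj hj
        omega
      · rw [if_neg hch] at hj
        have := hV ch j hj
        omega
    cases hg : last.get? c with
    | none =>
      dsimp only
      rw [if_neg (by omega)]
      exact ih (i + 1) start (last.insert c i) h0 (by omega) hV'
    | some j =>
      dsimp only
      have hj := hV c j hg
      rw [if_neg (show ¬((i - if start ≤ j then j + 1 else start) + 1 = length) by
        split_ifs <;> omega)]
      by_cases hsj : start ≤ j
      · simp only [if_pos hsj]
        exact ih (i + 1) (j + 1) (last.insert c i) (by omega) (by omega) hV'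
      · simp only [if_neg hsj]
        exact ih (i + 1) start (last.insert c i) h0 (by omega) hV'

theorem loopA_inv (l : List Char) (len : Nat) (hlen : 1 ≤ len) :
    ∀ (rest : List Char) (k : Nat), rest = l.drop (len - 1 + k) →
      solutionLoopA (len : Int) rest ((len : Int) + (k : Int)) ((l.drop k).take (len - 1)) =
      match (List.range' k (l.length + 1 - len - k)).find?
          (fun j => decide (((l.drop j).take len).Nodup)) with
      | some j => ((j : Int) + (len : Int))
      | none => 0 := by
  intro rest
  induction rest with
  | nil =>
    intro k h
    have hge : l.length ≤ len - 1 + k := List.drop_eq_nil_iff.mp h.symm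
    rw [show l.length + 1 - len - k = 0 from by omega]
    simp [solutionLoopA, List.range']
  | cons c rest' ih =>
    intro k h
    have hne : l.drop (len - 1 + k) ≠ [] := by rw [← h]; simp
    have hklt : len - 1 + k < l.length := by
      by_contra hcon
      exact hne (List.drop_eq_nil_of_le (by omega))
    have hc : l[len - 1 + k]? = some c := by
      have h0 := congrArg (fun t => t[0]?) h
      simp only [List.getElem?_drop, Nat.add_zero] at h0
      simpa using h0.symm
    have hrest' : rest' = l.drop (len - 1 + (k + 1)) := by
      have ht := congrArg List.tail h
      simp only [List.tail_cons, List.tail_drop] at ht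
      exact ht
    have hgd : (l.drop k)[len - 1]? = some c := by
      rw [List.getElem?_drop, ← hc]
      congr 1
      omega
    have hkey1 : (l.drop k).take (len - 1) ++ [c] = (l.drop k).take len := by
      conv_rhs => rw [show len = len - 1 + 1 from by omega, List.take_succ]
      rw [hgd]
      simp
    have hlen2 : ((l.drop k).take len).length = len := by
      simp only [List.length_take, List.length_drop]
      omega
    have hcond : (((PySem.Set.ofList ((l.drop k).take len)).length : Int) = (len : Int)) ↔
        ((l.drop k).take len).Nodup := by
      rw [Nat.cast_inj]
      constructor
      · intro hh
        exact (length_ofList_eq_iff_nodup _).mp (hh.trans hlen2.symm)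
      · intro hh
        rw [(length_ofList_eq_iff_nodup _).mpr hh, hlen2]
    simp only [solutionLoopA]
    rw [hkey1]
    rw [show l.length + 1 - len - k = (l.length + 1 - len - (k + 1)) + 1 from by omega,
        List.range'_succ]
    by_cases hnd : ((l.drop k).take len).Nodup
    · rw [if_pos (hcond.mpr hnd), List.find?_cons_of_pos (by simpa using hnd)]
      show (len : Int) + (k : Int) = (k : Int) + (len : Int)
      ring
    · rw [if_neg (fun hh => hnd (hcond.mp hh)), List.find?_cons_of_neg (by simpa using hnd)]
      have hkey3 : ((l.drop k).take len).drop 1 = (l.drop (k + 1)).take (len - 1) := by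
        rw [List.drop_take, List.drop_drop]
      rw [hkey3, show (len : Int) + (k : Int) + 1 = (len : Int) + ((k + 1 : Nat) : Int) from by
        push_cast; ring]
      exact ih (k + 1) hrest'

theorem loopB_inv (l : List Char) (len : Nat) (hlen : 1 ≤ len) :
    ∀ (rest : List Char) (i start : Nat) (last : PySem.Dict Char Int),
      rest = l.drop i →
      start ≤ i →
      i < start + len →
      (∀ s : Nat, ((l.take i).drop s).Nodup ↔ start ≤ s) →
      (∀ ch j, last.get? ch = some j → ∃ jn : Nat, j = (jn : Int) ∧ jn < i) →
      (∀ ch (s : Nat), s ≤ i →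
        (ch ∈ (l.take i).drop s ↔ ∃ jn : Nat, last.get? ch = some ((jn : Nat) : Int) ∧ s ≤ jn ∧ jn < i)) →
      (∀ k : Nat, k + len ≤ i → ¬ ((l.drop k).take len).Nodup) →
      solutionLoopB (len : Int) rest (i : Int) last (start : Int) = winSpec l len := by
  intro rest
  induction rest with
  | nil =>
    intro i start last h hsi hwin hS hV hL hH
    have hge : l.length ≤ i := List.drop_eq_nil_iff.mp h.symm
    have hfind : (List.range' 0 (l.length + 1 - len)).find?
        (fun k => decide (((l.drop k).take len).Nodup)) = none := by
      rw [List.find?_eq_none]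
      intro j hj
      simp only [List.mem_range'_1] at hj
      simpa using hH j (by omega)
    simp [solutionLoopB, winSpec, hfind]
  | cons c rest' ih =>
    intro i start last h hsi hwin hS hV hL hH
    have hne : l.drop i ≠ [] := by rw [← h]; simp
    have hilt : i < l.length := by
      by_contra hcon
      exact hne (List.drop_eq_nil_of_le (by omega))
    have hc : l[i]? = some c := by
      have h0 := congrArg (fun t => t[0]?) h
      simp only [List.getElem?_drop, Nat.add_zero] at h0
      simpa using h0.symm
    have hrest' : rest' = l.drop (i + 1) := by
      have ht := congrArg List.tail h
      simpa [List.tail_drop] using ht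
    have htake : l.take (i + 1) = l.take i ++ [c] := by
      rw [List.take_succ, hc]
      simp
    have hsliceid : ∀ s : Nat, s ≤ i → (l.take (i + 1)).drop s = (l.take i).drop s ++ [c] := by
      intro s hs
      rw [htake, List.drop_append_of_le_length (by simp [List.length_take]; omega)]
    have hempty : ∀ s : Nat, i + 1 ≤ s → (l.take (i + 1)).drop s = [] := by
      intro s hs
      exact List.drop_eq_nil_of_le (by simp [List.length_take]; omega)
    have hnodupApp : ∀ s : Nat, s ≤ i →
        (((l.take (i + 1)).drop s).Nodup ↔ (((l.take i).drop s).Nodup ∧ c ∉ (l.take i).drop s)) := by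
      intro s hs
      rw [hsliceid s hs, nodup_append_singleton_iff]
    -- shared continuation: after the step's new left edge sn has been computed
    have hcont : ∀ sn : Nat, start ≤ sn → sn ≤ i + 1 →
        (∀ s : Nat, ((l.take (i + 1)).drop s).Nodup ↔ sn ≤ s) →
        (∀ ch (s : Nat), s ≤ i + 1 →
          (ch ∈ (l.take (i + 1)).drop s ↔
            ∃ jn : Nat, (last.insert c (i : Int)).get? ch = some ((jn : Nat) : Int) ∧ s ≤ jn ∧ jn < i + 1)) →
        (if (i : Int) - (sn : Int) + 1 = (len : Int) then (i : Int) + 1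
         else solutionLoopB (len : Int) rest' ((i : Int) + 1) (last.insert c (i : Int)) (sn : Int)) =
          winSpec l len := by
      intro sn hstsn hsnle hS' hL'
      have hdroptake : ∀ k : Nat, k + len = i + 1 → (l.drop k).take len = (l.take (i + 1)).drop k := by
        intro k hk
        rw [List.drop_take]
        congr 1
        omega
      by_cases hfire : (i : Int) - (sn : Int) + 1 = (len : Int)
      · rw [if_pos hfire]
        have hk : sn + len = i + 1 := by omega
        have hfind : (List.range' 0 (l.length + 1 - len)).find?
            (fun k => decide (((l.drop k).take len).Nodup)) = some sn := by
          apply find?_range'_eq_some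
          · omega
          · intro j hj
            simpa using hH j (by omega)
          · simpa [hdroptake sn hk] using (hS' sn).mpr (le_refl sn)
        simp only [winSpec, hfind]
        omega
      · rw [if_neg hfire]
        have hci : (((i + 1 : Nat)) : Int) = (i : Int) + 1 := by push_cast; ring
        rw [← hci]
        apply ih (i + 1) sn (last.insert c (i : Int)) hrest' (by omega) (by omega) hS' ?_ hL' ?_
        · intro ch j hj
          rw [PySem.Dict.get?_insert] at hj
          by_cases hch : ch = c
          · rw [if_pos hch] at hj
            exact ⟨i, (Option.some.inj hj).symm, by omega⟩
          · rw [if_neg hch] at hj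
            obtain ⟨jn, rfl, hlt⟩ := hV ch j hj
            exact ⟨jn, rfl, by omega⟩
        · intro k hk
          by_cases hki : k + len ≤ i
          · exact hH k hki
          · have hk2 : k + len = i + 1 := by omega
            rw [hdroptake k hk2]
            intro hnd
            rw [hS' k] at hnd
            omega
    -- the new last-occurrence invariant (independent of the lookup's outcome)
    have hL' : ∀ ch (s : Nat), s ≤ i + 1 →
        (ch ∈ (l.take (i + 1)).drop s ↔
          ∃ jn : Nat, (last.insert c (i : Int)).get? ch = some ((jn : Nat) : Int) ∧ s ≤ jn ∧ jn < i + 1) := by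
      intro ch s hs1
      by_cases hch : ch = c
      · subst hch
        by_cases hs : s ≤ i
        · rw [hsliceid s hs]
          simp only [List.mem_append, List.mem_singleton]
          constructor
          · intro _
            exact ⟨i, by rw [PySem.Dict.get?_insert_self], hs, by omega⟩
          · intro _
            simp
        · rw [hempty s (by omega)]
          simp only [List.not_mem_nil, false_iff, not_exists]
          rintro jn ⟨hjn, h1, h2⟩
          rw [PySem.Dict.get?_insert_self] at hjn
          have := Option.some.inj hjn
          omega
      · have hget : (last.insert c (i : Int)).get? ch = last.get? ch := by
          rw [PySem.Dict.get?_insert, if_neg hch]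
        by_cases hs : s ≤ i
        · rw [hsliceid s hs]
          simp only [List.mem_append, List.mem_singleton]
          constructor
          · rintro (hm | hm)
            · obtain ⟨jn, hg2, h1, h2⟩ := (hL ch s hs).mp hm
              exact ⟨jn, by rw [hget]; exact hg2, h1, by omega⟩
            · exact absurd hm hch
          · rintro ⟨jn, hg2, h1, h2⟩
            rw [hget] at hg2
            by_cases hji : jn = i
            · obtain ⟨jn', hcast, hlt'⟩ := hV ch _ hg2
              have : jn = jn' := by exact_mod_cast hcast
              omega
            · exact Or.inl ((hL ch s hs).mpr ⟨jn, hg2, h1, by omega⟩)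
        · rw [hempty s (by omega)]
          simp only [List.not_mem_nil, false_iff, not_exists]
          rintro jn ⟨hjn, h1, h2⟩
          omega
    simp only [solutionLoopB]
    cases hg : last.get? c with
    | none =>
      dsimp only
      have hnotmem : ∀ s : Nat, s ≤ i → c ∉ (l.take i).drop s := by
        intro s hs hmem
        obtain ⟨jn, hjn, _, _⟩ := (hL c s hs).mp hmem
        rw [hg] at hjn
        simp at hjn
      apply hcont start (le_refl _) (by omega) ?_ hL'
      intro s
      by_cases hs : s ≤ i
      · rw [hnodupApp s hs, hS s]
        simp [hnotmem s hs]
      · rw [hempty s (by omega)]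
        simp only [List.nodup_nil, true_iff]
        omega
    | some j =>
      dsimp only
      obtain ⟨jn, rfl, hjnlt⟩ := hV c j hg
      have hmemiff : ∀ s : Nat, s ≤ i → (c ∈ (l.take i).drop s ↔ s ≤ jn) := by
        intro s hs
        rw [hL c s hs]
        constructor
        · rintro ⟨jn', hget, h1, h2⟩
          rw [hg] at hget
          have : jn = jn' := by exact_mod_cast Option.some.inj hget
          omega
        · intro hle'
          exact ⟨jn, hg, hle', hjnlt⟩
      have hcast : (if (start : Int) ≤ (jn : Int) then (jn : Int) + 1 else (start : Int)) =
          (((if start ≤ jn then jn + 1 else start : Nat)) : Int) := by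
        split_ifs with h1 h2 <;> push_cast <;> omega
      simp only [hcast]
      apply hcont (if start ≤ jn then jn + 1 else start) (by split_ifs <;> omega)
        (by split_ifs <;> omega) ?_ hL'
      intro s
      by_cases hs : s ≤ i
      · rw [hnodupApp s hs, hS s,
          show (c ∉ (l.take i).drop s) ↔ ¬ (s ≤ jn) from not_congr (hmemiff s hs)]
        split_ifs with hsj <;> omega
      · rw [hempty s (by omega)]
        simp only [List.nodup_nil, true_iff]
        split_ifs with hsj <;> omega

-- ===== VERDICT (by name: the statement is the Claim_ definition above) =====
theorem solution_spec : Claim_equal_solution := by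
  intro data length _hdom
  unfold Spec_solution
  simp only [solution, solution_alt]
  by_cases hpos : 1 ≤ length
  · obtain ⟨len, rfl⟩ : ∃ len : Nat, length = (len : Int) := ⟨length.toNat, by omega⟩
    have hlen1 : 1 ≤ len := by exact_mod_cast hpos
    have hs1 : PySem.List.slice data.toList none (some ((len : Int) - 1)) =
        data.toList.take (len - 1) := by
      rw [show ((len : Int) - 1) = ((len - 1 : Nat) : Int) from by omega,
        PySem.List.slice_to_natCast]
    have hs2 : PySem.List.slice data.toList (some ((len : Int) - 1)) none =
        data.toList.drop (len - 1) := by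
      rw [show ((len : Int) - 1) = ((len - 1 : Nat) : Int) from by omega,
        PySem.List.slice_from_natCast]
    rw [hs1, hs2]
    have hA := loopA_inv data.toList len hlen1 (data.toList.drop (len - 1)) 0 (by simp)
    simp only [Nat.cast_zero, add_zero, List.drop_zero, Nat.sub_zero] at hA
    rw [hA]
    have hB := loopB_inv data.toList len hlen1 data.toList 0 0 PySem.Dict.empty (by simp)
      (le_refl 0) (by omega) ?_ ?_ ?_ ?_
    · simp only [Nat.cast_zero] at hB
      rw [hB]
      unfold winSpec
      rfl
    · intro s
      simp
    · intro ch j hj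
      rw [PySem.Dict.get?_empty] at hj
      simp at hj
    · intro ch s hs
      simp [PySem.Dict.get?_empty]
    · intro k hk
      exact absurd hk (by omega)
  · rw [loopA_zero length (by omega) _ _ _,
      loopB_zero length (by omega) _ 0 0 PySem.Dict.empty (le_refl 0) (le_refl 0)
        (fun ch j hj => by rw [PySem.Dict.get?_empty] at hj; simp at hj)]
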